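-- pv_equiv track=rewrite | github.com/CepbluKot/demo-control-plane | log_summarizer/data_loader.py | _max_ts_from_rows
-- ===== SOURCE A (Python) =====
-- def _max_ts_from_rows(rows: list[dict], fallback: str) -> str:
--     """Извлекаем максимальный timestamp для keyset-пагинации."""
--     ts_values = []
--     for row in rows:
--         ts = row.get("timestamp") or row.get("time") or row.get("ts")
--         if ts is not None:
--             ts_values.append(str(ts))
--     if not ts_values:
--         return fallback
--     return max(ts_values)
-- ===== SOURCE B (Python) =====
-- def _max_ts_from_rows(rows: list[dict], fallback: str) -> str:
--     """Divide and conquer: max timestamp string of rows[lo:hi], combined pairwise."""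
--     def best(lo: int, hi: int):
--         if hi - lo == 0:
--             return None
--         if hi - lo == 1:
--             row = rows[lo]
--             ts = row.get("timestamp") or row.get("time") or row.get("ts")
--             return None if ts is None else str(ts)
--         mid = (lo + hi) // 2
--         l = best(lo, mid)
--         r = best(mid, hi)
--         if l is None:
--             return r
--         if r is None:
--             return l
--         return l if r <= l else r
--     b = best(0, len(rows))
--     return fallback if b is None else b
-- ===== Notes on version B (the rewrite author's own statement) =====
-- stated objective: alternative
-- what changed: B computes the maximum timestamp by divide and conquer over index ranges (split the row range in half, recurse, combine the two optional maxima), instead of A's single linear pass that collects all timestamp strings into a list and calls max() on it.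
import Mathlib
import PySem

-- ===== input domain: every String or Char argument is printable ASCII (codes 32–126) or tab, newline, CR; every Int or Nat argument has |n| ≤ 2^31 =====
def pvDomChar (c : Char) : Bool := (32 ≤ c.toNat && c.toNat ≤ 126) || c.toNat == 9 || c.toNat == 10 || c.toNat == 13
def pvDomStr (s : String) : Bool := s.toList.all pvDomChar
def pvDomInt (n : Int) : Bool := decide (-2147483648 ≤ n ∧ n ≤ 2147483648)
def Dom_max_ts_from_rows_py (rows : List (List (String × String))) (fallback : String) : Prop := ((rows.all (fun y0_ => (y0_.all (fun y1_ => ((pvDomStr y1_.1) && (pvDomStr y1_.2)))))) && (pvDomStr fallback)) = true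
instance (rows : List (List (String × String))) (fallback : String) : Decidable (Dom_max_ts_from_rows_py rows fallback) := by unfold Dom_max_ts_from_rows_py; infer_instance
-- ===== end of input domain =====

-- B replaces A's collect-into-a-list-then-max() linear pass by a divide-and-conquer
-- maximum over index ranges (objective: alternative algorithm, same O(n) time).

-- ===== PORT A =====
-- shared helper: Python `x or y` on string/None operands (falsy = None or "")
def pvOrStr (x y : Option String) : Option String :=
  match x with
  | some s => if s = "" then y else some s
  | none => y

-- shared helper: row.get("timestamp") or row.get("time") or row.get("ts")
def pvTsOf (row : List (String × String)) : Option String :=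
  pvOrStr (pvOrStr ((PySem.Dict.ofList row).get? "timestamp")
                   ((PySem.Dict.ofList row).get? "time"))
          ((PySem.Dict.ofList row).get? "ts")

def max_ts_from_rows_py (rows : List (List (String × String))) (fallback : String) : String :=
  let ts_values : List String :=
    rows.foldl (fun acc row =>
      match pvTsOf row with
      | some s => acc ++ [s]
      | none => acc) []
  match PySem.List.max? ts_values (fun y => y) with
  | none => fallback
  | some m => m

-- ===== PORT B =====
-- best(lo, hi): max timestamp string among rows[lo:hi], or none.  Indices are the
-- nonnegative ints 0 ≤ lo ≤ hi ≤ len(rows) of Source B, carried as Nat; rows[lo] is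
-- always in range in Source B, so the `none` arm of rows[lo]? is a totalization guard only.
def pvBest (rows : List (List (String × String))) (lo hi : Nat) : Option String :=
  if hi - lo = 0 then none
  else if hi - lo = 1 then
    match rows[lo]? with
    | none => none
    | some row => pvTsOf row
  else
    let mid := (lo + hi) / 2
    let l := pvBest rows lo mid
    let r := pvBest rows mid hi
    match l, r with
    | none, r => r
    | some l, none => some l
    | some l, some r => if r ≤ l then some l else some r
termination_by hi - lo
decreasing_by all_goals omega

def max_ts_from_rows_py_alt (rows : List (List (String × String))) (fallback : String) : String :=
  match pvBest rows 0 rows.length with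
  | none => fallback
  | some b => b

-- ===== PRECONDITION & SPEC =====
def Spec_max_ts_from_rows_py (rows : List (List (String × String))) (fallback : String) (out : String) : Prop := out = max_ts_from_rows_py_alt rows fallback
instance (rows : List (List (String × String))) (fallback : String) (out : String) : Decidable (Spec_max_ts_from_rows_py rows fallback out) := by unfold Spec_max_ts_from_rows_py; infer_instance

-- ===== CLAIM (what is proved, stated in full; the proofs are below) =====
def Claim_equal_max_ts_from_rows_py : Prop := ∀ (rows : List (List (String × String))) (fallback : String), Dom_max_ts_from_rows_py rows fallback → Spec_max_ts_from_rows_py rows fallback (max_ts_from_rows_py rows fallback)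

-- ===== LEMMAS AND PROOFS =====

-- the list A collects, written structurally
def pvCollect (rows : List (List (String × String))) : List String :=
  rows.flatMap (fun row => (pvTsOf row).toList)

-- max of a list of strings as an Option (none for [])
def pvListMax : List String → Option String
  | [] => none
  | x :: t => some (t.foldl max x)

lemma foldlA_eq (rows : List (List (String × String))) (acc : List String) :
    rows.foldl (fun acc row =>
      match pvTsOf row with
      | some s => acc ++ [s]
      | none => acc) acc = acc ++ pvCollect rows := by
  induction rows generalizing acc with
  | nil => simp [pvCollect]
  | cons r t ih =>
    cases h : pvTsOf r with
    | none => simp [List.foldl, h, ih, pvCollect]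
    | some s => simp [List.foldl, h, ih, pvCollect]

lemma foldl_max_max (l : List String) (a b : String) :
    l.foldl max (max a b) = max a (l.foldl max b) := by
  induction l generalizing b with
  | nil => simp
  | cons x t ih => simpa [List.foldl, max_assoc] using ih (max b x)

lemma pvListMax_append (a b : List String) :
    pvListMax (a ++ b) =
      match pvListMax a, pvListMax b with
      | none, r => r
      | some l, none => some l
      | some l, some r => some (max l r) := by
  cases a with
  | nil => cases b <;> simp [pvListMax]
  | cons x t =>
    cases b with
    | nil => simp [pvListMax]
    | cons y s =>
      simp [pvListMax, List.foldl_append, List.foldl, foldl_max_max]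

lemma pvListMax_single_opt (o : Option String) :
    pvListMax o.toList = o := by
  cases o <;> simp [pvListMax]

lemma pvBest_eq_aux (rows : List (List (String × String))) (n : Nat) :
    ∀ (lo hi : Nat), hi - lo ≤ n →
      pvBest rows lo hi = pvListMax (pvCollect ((rows.drop lo).take (hi - lo))) := by
  induction n with
  | zero =>
    intro lo hi hn
    have h0 : hi - lo = 0 := by omega
    rw [pvBest]
    simp [h0, pvCollect, pvListMax]
  | succ n ih =>
    intro lo hi hn
    rw [pvBest]
    by_cases h0 : hi - lo = 0
    · simp [h0, pvCollect, pvListMax]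
    · by_cases h1 : hi - lo = 1
      · rw [if_neg h0, if_pos h1, h1]
        cases hget : rows[lo]? with
        | none =>
          have hlen : rows.length ≤ lo := by simpa using List.getElem?_eq_none_iff.mp hget
          rw [List.drop_eq_nil_of_le hlen]
          simp [pvCollect, pvListMax]
        | some row =>
          obtain ⟨hlt, hrow⟩ := List.getElem?_eq_some_iff.mp hget
          rw [List.drop_eq_getElem_cons hlt]
          simp [hrow, pvCollect, pvListMax_single_opt]
      · rw [if_neg h0, if_neg h1]
        simp only [ih lo ((lo + hi) / 2) (by omega), ih ((lo + hi) / 2) hi (by omega)]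
        have hdd : (rows.drop lo).drop ((lo + hi) / 2 - lo) = rows.drop ((lo + hi) / 2) := by
          rw [List.drop_drop]
          congr 1
          omega
        have hsplit : (rows.drop lo).take (hi - lo)
            = (rows.drop lo).take ((lo + hi) / 2 - lo)
              ++ (rows.drop ((lo + hi) / 2)).take (hi - (lo + hi) / 2) := by
          rw [← hdd, ← List.take_add]
          congr 1
          omega
        rw [hsplit]
        rw [show pvCollect ((rows.drop lo).take ((lo + hi) / 2 - lo)
              ++ (rows.drop ((lo + hi) / 2)).take (hi - (lo + hi) / 2))
            = pvCollect ((rows.drop lo).take ((lo + hi) / 2 - lo))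
              ++ pvCollect ((rows.drop ((lo + hi) / 2)).take (hi - (lo + hi) / 2)) by
          simp [pvCollect]]
        rw [pvListMax_append]
        cases pvListMax (pvCollect ((rows.drop lo).take ((lo + hi) / 2 - lo))) with
        | none => rfl
        | some l =>
          cases pvListMax (pvCollect ((rows.drop ((lo + hi) / 2)).take (hi - (lo + hi) / 2))) with
          | none => rfl
          | some r =>
            by_cases h : r ≤ l
            · simp [h]
            · simp [h, max_eq_right (le_of_not_ge h)]

lemma pvBest_eq (rows : List (List (String × String))) (lo hi : Nat) :
    pvBest rows lo hi = pvListMax (pvCollect ((rows.drop lo).take (hi - lo))) :=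
  pvBest_eq_aux rows (hi - lo) lo hi le_rfl

-- ===== VERDICT (by name: the statement is the Claim_ definition above) =====
theorem max_ts_from_rows_py_spec : Claim_equal_max_ts_from_rows_py := by
  intro rows fallback _
  show _ = _
  unfold max_ts_from_rows_py max_ts_from_rows_py_alt
  rw [foldlA_eq, pvBest_eq]
  simp only [List.nil_append, List.drop_zero, Nat.sub_zero, List.take_length]
  cases h : pvCollect rows with
  | nil => simp [pvListMax, PySem.List.max?]
  | cons x t => simp [pvListMax, PySem.List.max?_id_cons]
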